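-- pv_equiv track=rewrite | github.com/steganographie-HTWG/NOGRAPHY | hide/app.py | get_letters_and_fonts
-- ===== SOURCE A (Python) =====
-- import string
--
-- def get_letters_and_fonts(placeholder, encoded_secret):
--     letters_and_fonts = []
--     index = 0
--     while index < len(placeholder):
--         if placeholder[index] in string.ascii_letters:
--             if index < len(encoded_secret):
--                 letters_and_fonts.append(
--                     (placeholder[index], encoded_secret[index]))
--             else:
--                 letters_and_fonts.append((placeholder[index], 0))
--             index = index + 1
--         else:
--             letters_and_fonts.append((placeholder[index], 0))
--             # slicing out the non-ASCII character, so it won't block the index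
--             placeholder = placeholder[:index] + placeholder[index+1:]
--     return letters_and_fonts
-- ===== SOURCE B (Python) =====
-- import string
--
-- def get_letters_and_fonts(placeholder, encoded_secret):
--     # One linear pass: letters consume the next font from an iterator (0 when
--     # exhausted); non-letters get font 0. Replaces A's quadratic slice-out loop.
--     fonts = iter(encoded_secret)
--     return [(c, next(fonts, 0) if c in string.ascii_letters else 0)
--             for c in placeholder]
-- ===== Notes on version B (the rewrite author's own statement) =====
-- stated objective: faster
-- what changed: A repeatedly slices non-letter characters out of the string and re-reads it with a while loop (the index doubling as a letter counter); B is a single pass over the characters consuming the secret through an iterator, no string mutation.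
import Mathlib
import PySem

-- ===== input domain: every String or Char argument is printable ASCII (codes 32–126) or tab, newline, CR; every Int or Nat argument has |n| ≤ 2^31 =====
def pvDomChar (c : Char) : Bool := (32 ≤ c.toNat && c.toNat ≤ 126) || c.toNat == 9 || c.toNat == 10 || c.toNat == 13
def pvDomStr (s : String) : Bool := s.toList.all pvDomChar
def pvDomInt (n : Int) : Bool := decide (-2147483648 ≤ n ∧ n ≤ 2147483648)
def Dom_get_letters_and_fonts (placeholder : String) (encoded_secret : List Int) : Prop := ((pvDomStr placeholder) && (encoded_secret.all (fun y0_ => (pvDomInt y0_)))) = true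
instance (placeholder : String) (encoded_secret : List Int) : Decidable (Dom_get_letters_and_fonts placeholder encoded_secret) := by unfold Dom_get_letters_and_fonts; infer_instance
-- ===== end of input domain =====

-- B replaces A's quadratic slice-out-and-rescan while loop with one linear pass
-- that consumes the secret through an iterator (objective: faster).

-- ===== PORT A =====
-- 'c in string.ascii_letters' for a single character is exactly Char.isAlpha
-- (ASCII 'A'..'Z' or 'a'..'z'); exact on the whole domain.
-- The while loop: each step either increments index (letter) or shortens the
-- string by slicing out one char, so placeholder.length - index decreases.
-- placeholder[:index] + placeholder[index+1:] with 0 ≤ index < length is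
-- exactly take index ++ drop (index+1).
def pvGoA (es : List Int) (pl : List Char) (index : Nat)
    (acc : List (String × Int)) : List (String × Int) :=
  if h : index < pl.length then
    if (pl[index]).isAlpha then
      if h2 : index < es.length then
        pvGoA es pl (index + 1) (acc ++ [(String.ofList [pl[index]], es[index])])
      else
        pvGoA es pl (index + 1) (acc ++ [(String.ofList [pl[index]], 0)])
    else
      pvGoA es (pl.take index ++ pl.drop (index + 1)) index
        (acc ++ [(String.ofList [pl[index]], 0)])
  else acc
termination_by pl.length - index
decreasing_by
  · omega
  · omega
  · simp [List.length_append, List.length_take, List.length_drop]; omega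

def get_letters_and_fonts (placeholder : String) (encoded_secret : List Int) : List (String × Int) :=
  pvGoA encoded_secret placeholder.toList 0 []

-- ===== PORT B =====
-- the iterator is ported as the remaining suffix of encoded_secret:
-- next(fonts, 0) = head (or 0) + advance to the tail.
def pvGoB (pl : List Char) (fonts : List Int) : List (String × Int) :=
  match pl with
  | [] => []
  | c :: rest =>
    if c.isAlpha then
      match fonts with
      | [] => (String.ofList [c], 0) :: pvGoB rest []
      | v :: fonts' => (String.ofList [c], v) :: pvGoB rest fonts'
    else
      (String.ofList [c], 0) :: pvGoB rest fonts

def get_letters_and_fonts_alt (placeholder : String) (encoded_secret : List Int) : List (String × Int) :=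
  pvGoB placeholder.toList encoded_secret

-- ===== PRECONDITION & SPEC =====
def Spec_get_letters_and_fonts (placeholder : String) (encoded_secret : List Int) (out : List (String × Int)) : Prop := out = get_letters_and_fonts_alt placeholder encoded_secret
instance (placeholder : String) (encoded_secret : List Int) (out : List (String × Int)) : Decidable (Spec_get_letters_and_fonts placeholder encoded_secret out) := by unfold Spec_get_letters_and_fonts; infer_instance

-- ===== CLAIM (what is proved, stated in full; the proofs are below) =====
def Claim_equal_get_letters_and_fonts : Prop := ∀ (placeholder : String) (encoded_secret : List Int), Dom_get_letters_and_fonts placeholder encoded_secret → Spec_get_letters_and_fonts placeholder encoded_secret (get_letters_and_fonts placeholder encoded_secret)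

-- ===== LEMMAS AND PROOFS =====

-- Invariant of A's loop: at state (pl, index) the loop has emitted `acc`,
-- exactly `index` secrets have been consumed (index only grows on letters),
-- and the rest of the run processes pl.drop index with fonts es.drop index.
theorem pvGoA_eq (es : List Int) (pl : List Char) (index : Nat)
    (acc : List (String × Int)) :
    pvGoA es pl index acc = acc ++ pvGoB (pl.drop index) (es.drop index) := by
  unfold pvGoA
  by_cases h : index < pl.length
  · rw [dif_pos h]
    have hdrop : pl.drop index = pl[index] :: pl.drop (index + 1) :=
      List.drop_eq_getElem_cons h
    by_cases halpha : (pl[index]).isAlpha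
    · rw [if_pos halpha]
      by_cases h2 : index < es.length
      · rw [dif_pos h2, pvGoA_eq]
        have hes : es.drop index = es[index] :: es.drop (index + 1) :=
          List.drop_eq_getElem_cons h2
        rw [hdrop, hes]
        simp only [pvGoB, halpha, if_pos, List.append_assoc, List.singleton_append]
      · rw [dif_neg h2, pvGoA_eq]
        have he1 : es.drop index = [] := List.drop_eq_nil_of_le (by omega)
        have he2 : es.drop (index + 1) = [] := List.drop_eq_nil_of_le (by omega)
        rw [hdrop, he1, he2]
        simp only [pvGoB, halpha, if_pos, List.append_assoc, List.singleton_append]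
    · rw [if_neg halpha, pvGoA_eq]
      have htk : (pl.take index).length = index := by
        simp [List.length_take]; omega
      have hd : (pl.take index ++ pl.drop (index + 1)).drop index
          = pl.drop (index + 1) := List.drop_left' htk
      rw [hdrop, hd]
      simp only [pvGoB, halpha, if_neg, Bool.false_eq_true, not_false_eq_true,
        List.append_assoc, List.singleton_append]
  · rw [dif_neg h]
    have : pl.drop index = [] := List.drop_eq_nil_of_le (by omega)
    rw [this]
    simp [pvGoB]
termination_by pl.length - index
decreasing_by
  · omega
  · omega
  · simp [List.length_append, List.length_take, List.length_drop]; omega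

-- ===== VERDICT (by name: the statement is the Claim_ definition above) =====
theorem get_letters_and_fonts_spec : Claim_equal_get_letters_and_fonts := by
  intro placeholder encoded_secret _
  unfold Spec_get_letters_and_fonts get_letters_and_fonts get_letters_and_fonts_alt
  simpa using pvGoA_eq encoded_secret placeholder.toList 0 []
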